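-- pv_equiv track=rewrite | github.com/timothy-ch-cheung/coding-problems | yahtzee_upper/yahtzee_upper.py | yahtzee_upper
-- ===== SOURCE A (Python) =====
-- def yahtzee_upper(dice_rolls):
--     score_dict = {}
--     for roll in dice_rolls:
--         if roll in score_dict:
--             score_dict[roll] = score_dict[roll] + roll
--         else:
--             score_dict[roll] = roll
--     return max(score_dict.values())
-- ===== SOURCE B (Python) =====
-- def yahtzee_upper(dice_rolls):
--     s = sorted(dice_rolls)
--     if not s:
--         raise ValueError("max() arg is an empty sequence")
--     face, run, best = s[0], 0, None
--     for x in s: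
--         if x == face:
--             run += x
--         else:
--             best = run if best is None or run > best else best
--             face, run = x, x
--     return run if best is None or run > best else best
-- ===== Notes on version B (the rewrite author's own statement) =====
-- stated objective: alternative
-- what changed: B sorts the rolls and computes the answer in one run-length scan over the sorted list (tracking the current group's running sum and the best so far), with no dictionary at all, instead of A's hash-dict of per-face sums followed by max over its values.
import Mathlib
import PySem

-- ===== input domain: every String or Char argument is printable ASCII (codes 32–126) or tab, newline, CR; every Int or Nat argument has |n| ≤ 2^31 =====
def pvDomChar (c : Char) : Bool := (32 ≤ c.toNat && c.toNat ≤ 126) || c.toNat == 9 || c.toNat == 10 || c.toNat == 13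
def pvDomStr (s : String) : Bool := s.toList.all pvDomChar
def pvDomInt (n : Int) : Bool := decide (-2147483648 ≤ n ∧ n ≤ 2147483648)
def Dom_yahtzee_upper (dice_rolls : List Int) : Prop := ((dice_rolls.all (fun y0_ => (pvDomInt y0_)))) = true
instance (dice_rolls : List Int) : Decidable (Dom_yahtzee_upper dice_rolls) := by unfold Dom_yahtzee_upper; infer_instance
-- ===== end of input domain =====

-- B sorts the rolls and takes the best run-length group sum in one scan, with no dict (alternative, same task).

-- ===== PORT A =====
-- score_dict accumulates per-face running sums; return max(score_dict.values()).
-- max() raises ValueError on an empty dict: Pre_ excludes the empty list, .getD 0 is unreached there.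
def yahtzee_upper (dice_rolls : List Int) : Int :=
  let score_dict : PySem.Dict Int Int :=
    dice_rolls.foldl
      (fun d roll =>
        if d.contains roll then d.insert roll (d.getD roll 0 + roll)
        else d.insert roll roll)
      PySem.Dict.empty
  (PySem.List.max? score_dict.values (fun y => y)).getD 0

-- ===== PORT B =====
-- s = sorted(dice_rolls); raise ValueError if empty (the [] branch below is unreached under Pre_);
-- then one scan over s keeping (face, run, best) and a final best-vs-run resolution.
def yahtzee_upper_alt (dice_rolls : List Int) : Int :=
  let s := PySem.List.sorted dice_rolls (fun x => x) false
  match s with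
  | [] => 0
  | s0 :: _ =>
    let st := s.foldl
      (fun (st : Int × Int × Option Int) x =>
        if x = st.1 then (st.1, st.2.1 + x, st.2.2)
        else (x, x, some (match st.2.2 with
                          | none => st.2.1
                          | some b => if b < st.2.1 then st.2.1 else b)))
      (s0, 0, none)
    match st.2.2 with
    | none => st.2.1
    | some b => if b < st.2.1 then st.2.1 else b

-- ===== PRECONDITION & SPEC =====
-- On the empty list Python's max() in A (and B's explicit check) raises ValueError: excluded.
def Pre_yahtzee_upper (dice_rolls : List Int) : Prop := dice_rolls ≠ []
instance (dice_rolls : List Int) : Decidable (Pre_yahtzee_upper dice_rolls) := by unfold Pre_yahtzee_upper; infer_instance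
def pvWitness_yahtzee_upper : List Int := [3, 3, 5]

def Spec_yahtzee_upper (dice_rolls : List Int) (out : Int) : Prop := out = yahtzee_upper_alt dice_rolls
instance (dice_rolls : List Int) (out : Int) : Decidable (Spec_yahtzee_upper dice_rolls out) := by unfold Spec_yahtzee_upper; infer_instance

-- ===== CLAIM =====
def Claim_equal_yahtzee_upper : Prop := ∀ (dice_rolls : List Int), Dom_yahtzee_upper dice_rolls → Pre_yahtzee_upper dice_rolls → Spec_yahtzee_upper dice_rolls (yahtzee_upper dice_rolls)

-- ===== LEMMAS AND PROOFS =====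

-- Python's 'run if best is None or run > best else best' (with best as the option, run as m)
def fin2 (best : Option Int) (m : Int) : Int :=
  match best with
  | none => m
  | some b => if b < m then m else b

theorem fin2_some (b m : Int) : fin2 (some b) m = max b m := by
  simp only [fin2]
  rcases lt_or_ge b m with h | h
  · rw [if_pos h, max_eq_right h.le]
  · rw [if_neg (not_lt.mpr h), max_eq_left h]

-- B's loop body
def yuStep (st : Int × Int × Option Int) (x : Int) : Int × Int × Option Int :=
  if x = st.1 then (st.1, st.2.1 + x, st.2.2) else (x, x, some (fin2 st.2.2 st.2.1))

-- ---- generic facts about Finset.fold max ----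
theorem foldpull (S : Finset Int) (f : Int → Int) (a b : Int) :
    S.fold max (max a b) f = max a (S.fold max b f) := by
  induction S using Finset.induction_on with
  | empty => simp
  | insert x S hx ih => rw [Finset.fold_insert hx, Finset.fold_insert hx, ih, max_left_comm]

theorem init_le_fold (S : Finset Int) (f : Int → Int) (b : Int) : b ≤ S.fold max b f := by
  induction S using Finset.induction_on with
  | empty => simp
  | insert x S hx ih => rw [Finset.fold_insert hx]; exact le_trans ih (le_max_right _ _)

theorem fold_absorb (S : Finset Int) (f : Int → Int) (a : Int) (ha : a ∈ S) (c : Int) :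
    S.fold max (max c (f a)) f = S.fold max c f := by
  induction S using Finset.induction_on with
  | empty => simp at ha
  | insert x S hx ih =>
    rcases Finset.mem_insert.mp ha with rfl | haS
    · rw [Finset.fold_insert hx, Finset.fold_insert hx, max_comm c (f a), foldpull,
        ← max_assoc, max_self]
    · rw [Finset.fold_insert hx, Finset.fold_insert hx, ih haS]

theorem fold_init_irrel (S : Finset Int) (f : Int → Int) (a b : Int)
    (ha : a ∈ S) (hb : b ∈ S) : S.fold max (f a) f = S.fold max (f b) f := by
  have h1 := fold_absorb S f b hb (f a)
  have h2 := fold_absorb S f a ha (f b)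
  rw [← h1, max_comm, h2]

theorem fold_insert_self_mem (K : Finset Int) (f : Int → Int) (a : Int) (ha : a ∈ K) :
    K.fold max (f a) f = (K.erase a).fold max (f a) f := by
  conv_lhs => rw [← Finset.insert_erase ha]
  rw [Finset.fold_insert (Finset.notMem_erase a K),
    max_eq_right (init_le_fold _ _ _)]

theorem foldl_map_toFinset (f : Int → Int) (ks : List Int) (hnd : ks.Nodup) (c : Int) :
    (ks.map f).foldl max c = Finset.fold max c f ks.toFinset := by
  induction ks generalizing c with
  | nil => simp
  | cons k kt ih =>
    have hk : k ∉ kt.toFinset := by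
      simp [List.mem_toFinset]; exact (List.nodup_cons.mp hnd).1
    rw [List.map_cons, List.foldl_cons, ih (List.nodup_cons.mp hnd).2,
      max_comm c (f k), foldpull, List.toFinset_cons, Finset.fold_insert hk]

-- ---- B's scan over a sorted list computes max over per-face group sums ----
theorem yu_scan (s : List Int) (face run : Int) (best : Option Int)
    (hs : s.Pairwise (· ≤ ·)) (hf : ∀ y ∈ s, face ≤ y) :
    fin2 (s.foldl yuStep (face, run, best)).2.2 (s.foldl yuStep (face, run, best)).2.1
      = fin2 best (Finset.fold max (run + face * (s.count face))
          (fun k => k * (s.count k)) ((s.filter (fun k => decide (k ≠ face))).toFinset)) := by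
  induction s generalizing face run best with
  | nil => simp [fin2]
  | cons x t ih =>
    have hst : t.Pairwise (· ≤ ·) := (List.pairwise_cons.mp hs).2
    have hxt : ∀ y ∈ t, x ≤ y := (List.pairwise_cons.mp hs).1
    by_cases hx : x = face
    · -- x joins the current group
      subst hx
      rw [List.foldl_cons, show yuStep (x, run, best) x = (x, run + x, best) by
        simp [yuStep]]
      rw [ih x (run + x) best hst hxt]
      have hfil : (x :: t).filter (fun k => decide (k ≠ x)) = t.filter (fun k => decide (k ≠ x)) := by
        simp
      have hcnt : (x :: t).count x = t.count x + 1 := by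
        simp
      rw [hfil, hcnt]
      have hinit : run + x + x * t.count x = run + x * ((t.count x : Int) + 1) := by ring
      rw [hinit]
      refine congrArg _ ?_
      refine Finset.fold_congr ?_
      intro k hk
      have hkx : k ≠ x := by
        simp only [List.mem_toFinset, List.mem_filter, decide_eq_true_eq] at hk
        exact hk.2
      have hxk : ¬ x = k := Ne.symm hkx
      simp [hxk]
    · -- x starts a new group
      have hface_le_x : face ≤ x := hf x (by simp)
      have hflt : face < x := lt_of_le_of_ne hface_le_x (fun h => hx h.symm)
      have hne_face : ∀ y ∈ x :: t, y ≠ face := by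
        intro y hy
        rcases List.mem_cons.mp hy with rfl | hyt
        · exact hx
        · exact fun h => absurd (hxt y hyt) (by rw [h]; exact not_le.mpr hflt)
      rw [List.foldl_cons, show yuStep (face, run, best) x = (x, x, some (fin2 best run)) by
        simp [yuStep, hx]]
      rw [ih x x (some (fin2 best run)) hst hxt]
      -- rewrite the RHS
      have hcnt0 : (x :: t).count face = 0 := by
        rw [List.count_eq_zero]
        intro h
        exact hne_face face h rfl
      have hfil : (x :: t).filter (fun k => decide (k ≠ face)) = x :: t := by
        rw [List.filter_eq_self]
        intro a ha
        simp [hne_face a ha]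
      rw [hcnt0, hfil]
      have hS : (x :: t).toFinset = insert x ((t.filter (fun k => decide (k ≠ x))).toFinset) := by
        ext k
        simp only [List.toFinset_cons, Finset.mem_insert, List.mem_toFinset, List.mem_filter,
          decide_eq_true_eq]
        constructor
        · rintro (rfl | hk)
          · exact Or.inl rfl
          · by_cases hkx : k = x
            · exact Or.inl hkx
            · exact Or.inr ⟨hk, hkx⟩
        · rintro (rfl | ⟨hk, _⟩)
          · exact Or.inl rfl
          · exact Or.inr hk
      have hxS : x ∉ (t.filter (fun k => decide (k ≠ x))).toFinset := by
        simp
      set S := (t.filter (fun k => decide (k ≠ x))).toFinset with hSdef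
      have hfcongr : ∀ k ∈ S, k * ((x :: t).count k : Int) = k * (t.count k : Int) := by
        intro k hk
        have hkx : k ≠ x := by
          simp only [hSdef, List.mem_toFinset, List.mem_filter, decide_eq_true_eq] at hk
          exact hk.2
        have hxk : ¬ x = k := Ne.symm hkx
        simp [hxk]
      have hfx : (x : Int) * ((x :: t).count x : Int) = x + x * (t.count x : Int) := by
        simp
        ring
      rw [hS, Finset.fold_insert hxS, Finset.fold_congr hfcongr, hfx]
      simp only [Nat.cast_zero, mul_zero, add_zero]
      -- pure max algebra
      set A : Int := x + x * (t.count x : Int)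
      set F : Int → Int := fun k => k * (t.count k : Int)
      cases best with
      | none =>
        rw [fin2_some]
        show max run (S.fold max A F) = fin2 none (max A (S.fold max run F))
        show max run (S.fold max A F) = max A (S.fold max run F)
        rw [show max run (S.fold max A F) = S.fold max (max run A) F by rw [foldpull],
          show max A (S.fold max run F) = S.fold max (max A run) F by rw [foldpull],
          max_comm run A]
      | some b =>
        rw [fin2_some, fin2_some, fin2_some,
          show max A (S.fold max run F) = S.fold max (max A run) F from (foldpull S F A run).symm,
          show max b (S.fold max (max A run) F) = S.fold max (max b (max A run)) F from
            (foldpull S F b (max A run)).symm,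
          show max (max b run) (S.fold max A F) = S.fold max (max (max b run) A) F from
            (foldpull S F (max b run) A).symm]
        congr 1
        ac_rfl

-- ---- A's dict of running sums: values = per-face group sums over first occurrences ----
theorem yu_step_eq (d : PySem.Dict Int Int) (roll : Int) :
    (if d.contains roll then d.insert roll (d.getD roll 0 + roll) else d.insert roll roll)
      = d.insert roll (d.getD roll 0 + roll) := by
  by_cases h : d.contains roll = true
  · simp [h]
  · have h' : d.contains roll = false := by simpa using h
    simp [h', PySem.Dict.getD_of_not_contains d (0 : Int) h']

theorem yu_getD_foldl (l : List Int) (d : PySem.Dict Int Int) (v : Int) :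
    (l.foldl (fun d x => d.insert x (d.getD x 0 + x)) d).getD v 0
      = d.getD v 0 + v * (l.count v : Int) := by
  induction l generalizing d with
  | nil => simp
  | cons x t ih =>
    simp only [List.foldl_cons, ih, PySem.Dict.getD_insert]
    rcases eq_or_ne v x with rfl | h
    · simp [List.count_cons_self]; ring
    · simp [h, List.count_cons]; exact Or.inl (Ne.symm h)

theorem yu_keys_foldl (l : List Int) :
    (l.foldl (fun d x => d.insert x (d.getD x 0 + x)) PySem.Dict.empty).keys
      = PySem.Set.ofList l := by
  rw [PySem.Dict.keys_foldl_insert]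
  simp [PySem.Set.update_nil_left]

theorem yu_values_eq (l : List Int) :
    (l.foldl (fun d x => d.insert x (d.getD x 0 + x)) PySem.Dict.empty).values
      = (PySem.Set.ofList l).map (fun k => k * (l.count k : Int)) := by
  have hnd : (l.foldl (fun d x => d.insert x (d.getD x 0 + x)) PySem.Dict.empty).keys.Nodup :=
    PySem.Dict.nodup_keys_foldl_insert _ _ _ (by simp)
  rw [PySem.Dict.values_eq_map_keys _ hnd 0, yu_keys_foldl]
  refine List.map_congr_left (fun k _ => ?_)
  simp [yu_getD_foldl]

-- ---- the two results agree on nonempty input ----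
theorem yahtzee_upper_eq (l : List Int) (hne : l ≠ []) :
    yahtzee_upper l = yahtzee_upper_alt l := by
  classical
  set f : Int → Int := fun k => k * (l.count k : Int) with hfdef
  set K : Finset Int := l.toFinset with hKdef
  -- A side
  have hA : ∃ k0, k0 ∈ K ∧ yahtzee_upper l = K.fold max (f k0) f := by
    simp only [yahtzee_upper]
    have hstep : (fun (d : PySem.Dict Int Int) roll =>
        if d.contains roll then d.insert roll (d.getD roll 0 + roll) else d.insert roll roll)
          = fun d roll => d.insert roll (d.getD roll 0 + roll) := by
      funext d roll; exact yu_step_eq d roll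
    rw [hstep, yu_values_eq, ← hfdef]
    obtain ⟨h, t, rfl⟩ := List.exists_cons_of_ne_nil hne
    cases hKA : PySem.Set.ofList (h :: t) with
    | nil =>
      exfalso
      have : h ∈ PySem.Set.ofList (h :: t) := by
        rw [PySem.Set.mem_ofList]; simp
      rw [hKA] at this; simp at this
    | cons k0 kt =>
      have hndKA : (k0 :: kt).Nodup := by rw [← hKA]; exact PySem.Set.nodup_ofList _
      refine ⟨k0, ?_, ?_⟩
      · have : k0 ∈ PySem.Set.ofList (h :: t) := by rw [hKA]; simp
        rw [PySem.Set.mem_ofList] at this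
        simpa [hKdef, List.mem_toFinset] using this
      · rw [List.map_cons, PySem.List.max?_id_cons, Option.getD_some,
          foldl_map_toFinset f kt (List.nodup_cons.mp hndKA).2]
        have hKfin : (k0 :: kt).toFinset = K := by
          ext k
          rw [List.mem_toFinset, ← hKA, PySem.Set.mem_ofList]
          simp [hKdef, List.mem_toFinset]
        have hk0kt : k0 ∉ kt.toFinset := by
          simp only [List.mem_toFinset]
          exact (List.nodup_cons.mp hndKA).1
        have : K.fold max (f k0) f = kt.toFinset.fold max (f k0) f := by
          rw [← hKfin, List.toFinset_cons, Finset.fold_insert hk0kt,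
            max_eq_right (init_le_fold _ _ _)]
        rw [this]
  -- B side
  have hB : ∃ s0, s0 ∈ K ∧ yahtzee_upper_alt l = K.fold max (f s0) f := by
    simp only [yahtzee_upper_alt]
    have hperm : (PySem.List.sorted l (fun x => x) false).Perm l := PySem.List.sorted_perm l _ _
    cases hsl : PySem.List.sorted l (fun x => x) false with
    | nil =>
      exfalso
      exact hne ((PySem.List.sorted_eq_nil_iff l (fun x => x) false).mp hsl)
    | cons s0 t =>
      rw [hsl] at hperm
      have hcount : ∀ k, (s0 :: t).count k = l.count k := fun k => hperm.count_eq k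
      have hsort : (s0 :: t).Pairwise (· ≤ ·) := by
        have := PySem.List.sorted_pairwise (xs := l) (key := fun x => x)
        rw [hsl] at this
        simpa using this
      have hf0 : ∀ y ∈ (s0 :: t), s0 ≤ y := by
        intro y hy
        rcases List.mem_cons.mp hy with rfl | hyt
        · exact le_refl _
        · exact (List.pairwise_cons.mp hsort).1 y hyt
      refine ⟨s0, ?_, ?_⟩
      · rw [hKdef, List.mem_toFinset, ← hperm.mem_iff]; simp
      · have hfold := yu_scan (s0 :: t) s0 0 none hsort hf0
        have hstep_eq : (fun (st : Int × Int × Option Int) x =>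
            if x = st.1 then (st.1, st.2.1 + x, st.2.2)
            else (x, x, some (match st.2.2 with
                              | none => st.2.1
                              | some b => if b < st.2.1 then st.2.1 else b))) = yuStep := by
          funext st x
          simp only [yuStep, fin2]
        have hfin_eq : ∀ (st : Int × Int × Option Int),
            (match st.2.2 with
             | none => st.2.1
             | some b => if b < st.2.1 then st.2.1 else b) = fin2 st.2.2 st.2.1 := by
          intro st; cases h : st.2.2 <;> simp [fin2]
        rw [hstep_eq]
        dsimp only
        rw [hfin_eq, hfold]
        -- now massage the RHS into K.fold max (f s0) f
        have hfil : ((s0 :: t).filter (fun k => decide (k ≠ s0))).toFinset = K.erase s0 := by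
          ext k
          simp only [List.mem_toFinset, List.mem_filter, decide_eq_true_eq, Finset.mem_erase,
            hKdef]
          rw [← hperm.mem_iff]
          tauto
        have hcongr : ∀ k ∈ K.erase s0,
            k * (((s0 :: t).count k : Int)) = f k := by
          intro k _
          rw [hcount k, hfdef]
        have hinit : (0 : Int) + s0 * ((s0 :: t).count s0 : Int) = f s0 := by
          rw [hcount s0]; simp [hfdef]
        rw [hfil, Finset.fold_congr hcongr, hinit]
        show fin2 none ((K.erase s0).fold max (f s0) f) = K.fold max (f s0) f
        rw [show ∀ m, fin2 none m = m from fun _ => rfl]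
        have hs0K : s0 ∈ K := by
          rw [hKdef, List.mem_toFinset, ← hperm.mem_iff]; simp
        rw [← fold_insert_self_mem K f s0 hs0K]
  obtain ⟨k0, hk0, hAe⟩ := hA
  obtain ⟨s0, hs0, hBe⟩ := hB
  rw [hAe, hBe]
  exact fold_init_irrel K f k0 s0 hk0 hs0

-- ===== VERDICT =====
theorem yahtzee_upper_spec : Claim_equal_yahtzee_upper := by
  intro l _ hpre
  exact yahtzee_upper_eq l hpre
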